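-- pv_equiv track=rewrite | github.com/trac3er00/OMG | runtime/team_router.py | _council_status
-- ===== SOURCE A (Python) =====
-- from typing import Any
--
-- def _council_status(verdicts: dict[str, dict[str, Any]]) -> str:
--     verdict_tokens = {
--         str(item.get("verdict", "")).strip().lower()
--         for item in verdicts.values()
--         if isinstance(item, dict)
--     }
--     if "fail" in verdict_tokens:
--         return "blocked"
--     if "warn" in verdict_tokens:
--         return "running"
--     if "pass" in verdict_tokens:
--         return "ok"
--     return "pending"
-- ===== SOURCE B (Python) =====
-- def _council_status(verdicts: dict[str, dict] ) -> str:
--     rank = 3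
--     for item in verdicts.values():
--         if isinstance(item, dict):
--             token = str(item.get("verdict", "")).strip().lower()
--             r = {"fail": 0, "warn": 1, "pass": 2}.get(token, 3)
--             if r < rank:
--                 rank = r
--     return ["blocked", "running", "ok", "pending"][rank]
-- ===== Notes on version B (the rewrite author's own statement) =====
-- stated objective: alternative
-- what changed: B replaces A's build-a-set-of-tokens plus ordered membership checks by a single running-minimum severity rank per verdict, indexing a status table at the end.
import Mathlib
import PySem

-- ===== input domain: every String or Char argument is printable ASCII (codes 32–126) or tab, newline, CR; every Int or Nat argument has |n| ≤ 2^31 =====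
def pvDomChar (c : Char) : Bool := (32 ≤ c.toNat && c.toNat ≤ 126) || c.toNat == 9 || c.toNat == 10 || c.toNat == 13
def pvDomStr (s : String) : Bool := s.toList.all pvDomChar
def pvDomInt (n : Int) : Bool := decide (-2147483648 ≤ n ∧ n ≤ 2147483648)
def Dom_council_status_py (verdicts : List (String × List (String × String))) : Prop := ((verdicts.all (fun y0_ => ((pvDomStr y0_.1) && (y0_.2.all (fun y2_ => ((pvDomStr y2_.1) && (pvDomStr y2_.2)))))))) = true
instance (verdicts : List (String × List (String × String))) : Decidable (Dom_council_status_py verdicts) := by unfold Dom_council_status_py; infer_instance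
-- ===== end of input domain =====

-- B keeps a single running-minimum severity rank per verdict instead of A's token set + ordered membership checks; return values are proved identical.
-- In this Lean model the inner values are dicts (List (String × String)), so Python's 'isinstance(item, dict)' is always true and 'str(...)' on the looked-up string is the identity; both ports reflect that.

-- ===== PORT A =====
-- token of one item: str(item.get("verdict", "")).strip().lower()
def pvTok (item : List (String × String)) : String :=
  PySem.Str.lower (PySem.Str.strip ((PySem.Dict.mk item).getD "verdict" ""))

def council_status_py (verdicts : List (String × List (String × String))) : String :=
  let verdict_tokens : PySem.Set String :=
    PySem.Set.ofList (((PySem.Dict.mk verdicts).values).map pvTok)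
  if PySem.Set.contains verdict_tokens "fail" then "blocked"
  else if PySem.Set.contains verdict_tokens "warn" then "running"
  else if PySem.Set.contains verdict_tokens "pass" then "ok"
  else "pending"

-- ===== PORT B =====
def council_status_py_alt (verdicts : List (String × List (String × String))) : String :=
  let rank : Nat :=
    ((PySem.Dict.mk verdicts).values).foldl (fun rank item =>
      let r := (PySem.Dict.mk [("fail", 0), ("warn", 1), ("pass", 2)]).getD (pvTok item) 3
      if r < rank then r else rank) 3
  PySem.List.pyGetD ["blocked", "running", "ok", "pending"] (rank : Int) ""

-- ===== PRECONDITION & SPEC =====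
def Spec_council_status_py (verdicts : List (String × List (String × String))) (out : String) : Prop := out = council_status_py_alt verdicts
instance (verdicts : List (String × List (String × String))) (out : String) : Decidable (Spec_council_status_py verdicts out) := by unfold Spec_council_status_py; infer_instance

-- ===== CLAIM (what is proved, stated in full; the proofs are below) =====
def Claim_equal_council_status_py : Prop := ∀ (verdicts : List (String × List (String × String))), Dom_council_status_py verdicts → Spec_council_status_py verdicts (council_status_py verdicts)

-- ===== LEMMAS AND PROOFS =====

def pvRk (t : String) : Nat :=
  if t = "fail" then 0 else if t = "warn" then 1 else if t = "pass" then 2 else 3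

def pvAr (l : List String) : Nat :=
  if l.contains "fail" then 0 else if l.contains "warn" then 1
  else if l.contains "pass" then 2 else 3

theorem pvStep (t : String) :
    (PySem.Dict.mk [("fail", 0), ("warn", 1), ("pass", 2)]).getD t 3 = pvRk t := by
  by_cases h1 : t = "fail"
  · subst h1; decide
  by_cases h2 : t = "warn"
  · subst h2; decide
  by_cases h3 : t = "pass"
  · subst h3; decide
  have b1 : ("fail" == t) = false := beq_eq_false_iff_ne.mpr (Ne.symm h1)
  have b2 : ("warn" == t) = false := beq_eq_false_iff_ne.mpr (Ne.symm h2)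
  have b3 : ("pass" == t) = false := beq_eq_false_iff_ne.mpr (Ne.symm h3)
  simp [PySem.Dict.getD_eq_get?_getD, PySem.Dict.get?_mk_cons, PySem.Dict.get?_empty,
    pvRk, h1, h2, h3, b1, b2, b3]
  rfl

theorem pvBody :
    (fun (rank : Nat) (item : List (String × String)) =>
      let r := (PySem.Dict.mk [("fail", 0), ("warn", 1), ("pass", 2)]).getD (pvTok item) 3
      if r < rank then r else rank) = fun rank item => min rank (pvRk (pvTok item)) := by
  funext rank item
  simp only [pvStep]
  split_ifs <;> omega

theorem pvAr_cons (t : String) (l : List String) :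
    min (pvRk t) (pvAr l) = pvAr (t :: l) := by
  unfold pvRk pvAr
  by_cases h1 : t = "fail" <;> by_cases h2 : t = "warn" <;> by_cases h3 : t = "pass" <;>
    simp_all [List.contains_cons, eq_comm] <;> split_ifs <;> omega

theorem pvAr_le (l : List String) : pvAr l ≤ 3 := by
  unfold pvAr; split_ifs <;> omega

theorem pvRk_le (t : String) : pvRk t ≤ 3 := by
  unfold pvRk; split_ifs <;> omega

theorem pvFold (l : List String) (acc : Nat) (h : acc ≤ 3) :
    l.foldl (fun rank t => min rank (pvRk t)) acc = min acc (pvAr l) := by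
  induction l generalizing acc with
  | nil => have := pvAr_le ([] : List String); simp [pvAr] at *; omega
  | cons t l ih =>
    rw [List.foldl_cons, ih _ (by have := pvRk_le t; omega), ← pvAr_cons t l]
    omega

-- ===== VERDICT (by name: the statement is the Claim_ definition above) =====
theorem council_status_py_spec : Claim_equal_council_status_py := by
  intro verdicts _
  unfold Spec_council_status_py council_status_py council_status_py_alt
  rw [pvBody]
  have hfold := pvFold (((PySem.Dict.mk verdicts).values).map pvTok) 3 (by omega)
  simp only [List.foldl_map] at hfold
  rw [hfold]
  have hmin : min 3 (pvAr (((PySem.Dict.mk verdicts).values).map pvTok)) =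
      pvAr (((PySem.Dict.mk verdicts).values).map pvTok) := by
    have := pvAr_le (((PySem.Dict.mk verdicts).values).map pvTok)
    omega
  rw [hmin]
  set toks := ((PySem.Dict.mk verdicts).values).map pvTok with htoks
  have hc : ∀ x : String, PySem.Set.contains (PySem.Set.ofList toks) x = toks.contains x := by
    intro x
    simp [PySem.Set.contains, PySem.Set.mem_ofList, List.contains_iff_mem]
  unfold pvAr
  simp only [hc]
  by_cases h1 : "fail" ∈ toks <;> by_cases h2 : "warn" ∈ toks <;>
    by_cases h3 : "pass" ∈ toks <;>
    simp [h1, h2, h3, List.contains_iff_mem] <;> decide
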